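-- pv_equiv track=rewrite | github.com/stonemoose/advent_of_code | 2025/04/solver.py | parse
-- ===== SOURCE A (Python) =====
-- def parse(input_data):
--     parsed = []
--     width = len(input_data.split()[0]) + 2
--     parsed.append([0] * width)
--     for line in input_data.split():
--         parsed.append([0] + [int(c == "@") for c in line] + [0])
--     parsed.append([0] * width)
--     return parsed
-- ===== SOURCE B (Python) =====
-- def parse(input_data):
--     # One fused character scan: tokenize and translate in a single state machine,
--     # instead of split() followed by per-line comprehensions.
--     rows = []
--     cur = None
--     for c in input_data:
--         if c.isspace():
--             if cur is not None:
--                 cur.append(0)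
--                 rows.append(cur)
--                 cur = None
--         else:
--             if cur is None:
--                 cur = [0]
--             cur.append(1 if c == "@" else 0)
--     if cur is not None:
--         cur.append(0)
--         rows.append(cur)
--     width = len(rows[0])  # IndexError when input has no tokens, same as A's split()[0]
--     return [[0] * width] + rows + [[0] * width]
-- ===== Notes on version B (the rewrite author's own statement) =====
-- stated objective: alternative
-- what changed: B replaces A's split()-then-per-line-comprehension with a single fused character scan: one state machine over the raw string that tokenizes and emits padded 0/1 rows in the same pass (no intermediate list of line strings).
import Mathlib
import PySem

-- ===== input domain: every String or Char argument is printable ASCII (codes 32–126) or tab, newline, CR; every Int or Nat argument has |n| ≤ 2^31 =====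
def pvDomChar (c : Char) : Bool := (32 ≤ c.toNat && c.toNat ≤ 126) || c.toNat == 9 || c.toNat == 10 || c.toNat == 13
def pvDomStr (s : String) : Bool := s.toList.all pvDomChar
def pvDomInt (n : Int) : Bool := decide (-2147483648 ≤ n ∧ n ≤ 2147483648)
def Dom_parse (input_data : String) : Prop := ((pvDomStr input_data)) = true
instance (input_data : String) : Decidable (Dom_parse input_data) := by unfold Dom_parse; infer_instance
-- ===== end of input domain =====

-- B fuses tokenization and 0/1 translation into one character-scan state machine, instead of A's split() + per-row comprehension; same cost, different algorithmic organisation ("alternative"). Equivalence of return values only.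


-- ===== PORT A =====
def parse (input_data : String) : List (List Int) :=
  match PySem.List.pyGet? (PySem.Str.split₀ input_data) 0 with
  | none => []   -- IndexError in Python: excluded by Pre_parse
  | some first =>
    let width := first.toList.length + 2
    let init : List (List Int) := [List.replicate width 0]
    let body := (PySem.Str.split₀ input_data).foldl
      (fun acc line =>
        acc ++ [[(0 : Int)] ++ line.toList.map (fun c => if c = '@' then (1 : Int) else 0) ++ [(0 : Int)]])
      init
    body ++ [List.replicate width 0]

-- ===== PORT B =====
-- one fold over the characters; state = (finished rows, current row being built or none)
def parseAltStep (st : List (List Int) × Option (List Int)) (c : Char) :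
    List (List Int) × Option (List Int) :=
  if PySem.Chars.isspace c then
    match st.2 with
    | some cur => (st.1 ++ [cur ++ [(0 : Int)]], none)
    | none => st
  else
    let cur := (st.2).getD [(0 : Int)]
    (st.1, some (cur ++ [if c = '@' then (1 : Int) else 0]))

-- the trailing "if cur is not None: …" block of Source B, as a named finalizer
def parseAltFin (st : List (List Int) × Option (List Int)) : List (List Int) :=
  match st.2 with
  | some cur => st.1 ++ [cur ++ [(0 : Int)]]
  | none => st.1

def parse_alt (input_data : String) : List (List Int) :=
  let st := input_data.toList.foldl parseAltStep ([], none)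
  let rows := parseAltFin st
  match PySem.List.pyGet? rows 0 with
  | none => []   -- IndexError in Python: excluded by Pre_parse
  | some first =>
    let width := first.length
    [List.replicate width 0] ++ rows ++ [List.replicate width 0]

-- ===== PRECONDITION & SPEC =====
-- Pre_ excludes exactly the inputs with no whitespace-separated token, where Python A raises IndexError on split()[0].
def Pre_parse (input_data : String) : Prop := PySem.Str.split₀ input_data ≠ []
instance (input_data : String) : Decidable (Pre_parse input_data) := by unfold Pre_parse; infer_instance
def pvWitness_parse : String := "@."

def Spec_parse (input_data : String) (out : List (List Int)) : Prop := out = parse_alt input_data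
instance (input_data : String) (out : List (List Int)) : Decidable (Spec_parse input_data out) := by unfold Spec_parse; infer_instance

-- ===== CLAIM (what is proved, stated in full; the proofs are below) =====
def Claim_equal_parse : Prop := ∀ (input_data : String), Dom_parse input_data → Pre_parse input_data → Spec_parse input_data (parse input_data)

-- ===== LEMMAS AND PROOFS =====

-- the row A builds from a word
def pvRowA (w : List Char) : List Int :=
  [(0 : Int)] ++ w.map (fun c => if c = '@' then (1 : Int) else 0) ++ [(0 : Int)]

-- B's optional current-row value corresponding to split₀.go's (reversed) current word
def pvOptOf (cur : List Char) : Option (List Int) :=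
  if cur.isEmpty then none
  else some ([(0 : Int)] ++ cur.reverse.map (fun c => if c = '@' then (1 : Int) else 0))

lemma pv_foldl_append (lines : List String) (init : List (List Int)) :
    lines.foldl
      (fun acc line =>
        acc ++ [[(0 : Int)] ++ line.toList.map (fun c => if c = '@' then (1 : Int) else 0) ++ [(0 : Int)]])
      init
    = init ++ lines.map (fun line => pvRowA line.toList) := by
  induction lines generalizing init with
  | nil => simp
  | cons l ls ih => rw [List.foldl_cons, ih]; simp [pvRowA]

lemma pv_go_nil (cur : List Char) (acc : List (List Char)) :
    PySem.Chars.split₀.go [] cur acc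
    = if cur.isEmpty then acc.reverse else (cur.reverse :: acc).reverse := rfl

lemma pv_go_cons (c : Char) (rest cur : List Char) (acc : List (List Char)) :
    PySem.Chars.split₀.go (c :: rest) cur acc
    = if PySem.Chars.isspace c then
        (if cur.isEmpty then PySem.Chars.split₀.go rest [] acc
         else PySem.Chars.split₀.go rest [] (cur.reverse :: acc))
      else PySem.Chars.split₀.go rest (c :: cur) acc := rfl

lemma pv_go_shift (s : List Char) :
    ∀ (cur : List Char) (acc : List (List Char)),
      PySem.Chars.split₀.go s cur acc = acc.reverse ++ PySem.Chars.split₀.go s cur [] := by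
  induction s with
  | nil =>
    intro cur acc
    by_cases h : cur.isEmpty <;> simp [pv_go_nil, h]
  | cons c rest ih =>
    intro cur acc
    by_cases hs : PySem.Chars.isspace c
    · by_cases hc : cur.isEmpty
      · simp only [pv_go_cons, hs, hc, if_true]
        exact ih [] acc
      · simp only [pv_go_cons, hs, hc, if_true]
        rw [ih [] (cur.reverse :: acc), ih [] [cur.reverse]]
        simp
    · simp only [pv_go_cons, hs]
      exact ih (c :: cur) acc

-- main invariant: B's fold, finalized, produces A's rows for the remaining suffix
lemma pv_main (s : List Char) :
    ∀ (cur : List Char) (R : List (List Int)),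
      parseAltFin (s.foldl parseAltStep (R, pvOptOf cur))
      = R ++ (PySem.Chars.split₀.go s cur []).map pvRowA := by
  induction s with
  | nil =>
    intro cur R
    by_cases hc : cur.isEmpty
    · simp [pv_go_nil, hc, parseAltFin, pvOptOf]
    · simp [pv_go_nil, hc, parseAltFin, pvOptOf, pvRowA]
  | cons c rest ih =>
    intro cur R
    rw [List.foldl_cons]
    by_cases hs : PySem.Chars.isspace c
    · by_cases hc : cur.isEmpty
      · have hstep : parseAltStep (R, pvOptOf cur) c = (R, pvOptOf ([] : List Char)) := by
          simp [parseAltStep, hs, pvOptOf, hc]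
        rw [hstep, ih]
        simp [pv_go_cons, hs, hc]
      · have hstep : parseAltStep (R, pvOptOf cur) c
            = (R ++ [pvRowA cur.reverse], pvOptOf ([] : List Char)) := by
          simp [parseAltStep, hs, pvOptOf, hc, pvRowA]
        rw [hstep, ih]
        simp only [pv_go_cons, hs, hc, if_true]
        rw [pv_go_shift rest [] [cur.reverse]]
        simp
    · have hstep : parseAltStep (R, pvOptOf cur) c = (R, pvOptOf (c :: cur)) := by
        by_cases hc : cur.isEmpty
        · cases cur with
          | nil => simp [parseAltStep, hs, pvOptOf]
          | cons _ _ => simp at hc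
        · simp [parseAltStep, hs, pvOptOf, hc]
      rw [hstep, ih]
      simp [pv_go_cons, hs]

-- ===== VERDICT (by name: the statement is the Claim_ definition above) =====
theorem parse_spec : Claim_equal_parse := by
  intro input_data _hdom hpre
  unfold Spec_parse parse parse_alt
  have hrows : parseAltFin (input_data.toList.foldl parseAltStep ([], none))
      = (PySem.Chars.split₀ input_data.toList).map pvRowA := by
    have := pv_main input_data.toList [] []
    simpa [pvOptOf, PySem.Chars.split₀] using this
  have hsplit : PySem.Str.split₀ input_data
      = (PySem.Chars.split₀ input_data.toList).map String.ofList := by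
    simp [PySem.Str.split₀]
  cases hw : PySem.Chars.split₀ input_data.toList with
  | nil => exact absurd (by simp [hsplit, hw]) hpre
  | cons w ws =>
    rw [hw] at hrows
    simp only [hsplit, hw, hrows, pv_foldl_append, PySem.List.pyGet?, PySem.List.pyIdx?]
    simp [pvRowA]
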